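-- pv_equiv track=rewrite | github.com/mbzuai-oryx/CoME-VL | olmo/cross_rope.py | _even_splits
-- ===== SOURCE A (Python) =====
-- from typing import Optional, Tuple, Literal, List, Sequence
--
-- def _even_splits(d: int, n_axes: int) -> Tuple[int, ...]:
--     """Evenly split per-head dim d across n_axes, each part even; sum(parts) == d."""
--     base = (d // (2 * n_axes)) * 2  # even
--     parts = [base] * n_axes
--     rem = d - sum(parts)
--     i = 0
--     while rem > 0:
--         parts[i] += 2
--         rem -= 2
--         i = (i + 1) % n_axes
--     return tuple(parts)
-- ===== SOURCE B (Python) =====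
-- def _even_splits(d: int, n_axes: int):
--     """Evenly split per-head dim d across n_axes, each part even; sum(parts) == d."""
--     base = (d // (2 * n_axes)) * 2
--     k = (d - base * n_axes + 1) // 2  # number of axes receiving the +2 bonus
--     return tuple(base + 2 if i < k else base for i in range(n_axes))
-- ===== Notes on version B (the rewrite author's own statement) =====
-- stated objective: simpler
-- what changed: B replaces the round-robin while-loop with running remainder by a closed-form count k = (rem+1)//2 of axes that receive the +2 bonus and builds the tuple in one direct comprehension.
import Mathlib
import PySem

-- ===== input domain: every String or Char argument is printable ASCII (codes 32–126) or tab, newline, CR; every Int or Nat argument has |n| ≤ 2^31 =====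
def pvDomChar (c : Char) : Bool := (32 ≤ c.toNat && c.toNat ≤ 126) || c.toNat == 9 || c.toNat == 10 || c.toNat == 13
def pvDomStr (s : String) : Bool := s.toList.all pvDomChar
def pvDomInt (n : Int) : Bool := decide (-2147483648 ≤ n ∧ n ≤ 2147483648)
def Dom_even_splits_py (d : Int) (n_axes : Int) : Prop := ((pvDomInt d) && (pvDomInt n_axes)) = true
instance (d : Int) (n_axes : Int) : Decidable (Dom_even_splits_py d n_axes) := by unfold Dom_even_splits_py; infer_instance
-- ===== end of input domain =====

-- B computes the number of +2 bonus axes in closed form instead of A's round-robin while-loop (objective: simpler).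

-- ===== PORT A =====
-- the while-loop of A; Python raises IndexError when parts[i] is out of range (excluded by Pre_)
def evenLoop (n_axes : Int) (parts : List Int) (rem : Int) (i : Int) : List Int :=
  if rem > 0 then
    match PySem.List.pyGet? parts i with
    | none => parts   -- IndexError in Python: unreachable inside Pre_
    | some v =>
        evenLoop n_axes (PySem.List.pySetD parts i (v + 2)) (rem - 2) (PySem.Int.mod (i + 1) n_axes)
  else parts
termination_by rem.toNat
decreasing_by omega

def even_splits_py (d : Int) (n_axes : Int) : List Int :=
  let base := PySem.Int.floordiv d (2 * n_axes) * 2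
  let parts := List.replicate n_axes.toNat base
  let rem := d - parts.sum
  evenLoop n_axes parts rem 0

-- ===== PORT B =====
def even_splits_py_alt (d : Int) (n_axes : Int) : List Int :=
  let base := PySem.Int.floordiv d (2 * n_axes) * 2
  let k := PySem.Int.floordiv (d - base * n_axes + 1) 2
  (PySem.List.pyRange 0 n_axes 1).map (fun i => if i < k then base + 2 else base)

-- ===== PRECONDITION & SPEC =====
-- Pre_ excludes exactly the inputs on which A raises: n_axes = 0 (ZeroDivisionError) and
-- n_axes < 0 with d > 0 (IndexError: parts is empty but rem > 0).
def Pre_even_splits_py (d : Int) (n_axes : Int) : Prop :=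
  0 < n_axes ∨ (n_axes < 0 ∧ d ≤ 0)
instance (d : Int) (n_axes : Int) : Decidable (Pre_even_splits_py d n_axes) := by
  unfold Pre_even_splits_py; infer_instance
def pvWitness_even_splits_py : Int × Int := (16, 3)

def Spec_even_splits_py (d : Int) (n_axes : Int) (out : List Int) : Prop := out = even_splits_py_alt d n_axes
instance (d : Int) (n_axes : Int) (out : List Int) : Decidable (Spec_even_splits_py d n_axes out) := by unfold Spec_even_splits_py; infer_instance

-- ===== CLAIM (what is proved, stated in full; the proofs are below) =====
def Claim_equal_even_splits_py : Prop := ∀ (d : Int) (n_axes : Int), Dom_even_splits_py d n_axes → Pre_even_splits_py d n_axes → Spec_even_splits_py d n_axes (even_splits_py d n_axes)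

-- ===== LEMMAS AND PROOFS =====

-- what A's loop does to the suffix it still visits: +2 to the heads while rem > 0
def bump : List Int → Int → List Int
  | [], _ => []
  | x :: xs, r => if r > 0 then (x + 2) :: bump xs (r - 2) else x :: xs

theorem bump_nonpos (l : List Int) (r : Int) (h : r ≤ 0) : bump l r = l := by
  cases l with
  | nil => rfl
  | cons x xs => simp [bump]; omega

theorem evenLoop_nonpos (n : Int) (p : List Int) (r i : Int) (h : r ≤ 0) :
    evenLoop n p r i = p := by
  unfold evenLoop; rw [if_neg]; omega

theorem set_append_cons (pre : List Int) (x v : Int) (xs : List Int) :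
    (pre ++ x :: xs).set pre.length v = pre ++ v :: xs := by
  induction pre with
  | nil => rfl
  | cons a l ih => simp [List.set, ih]

theorem evenLoop_append (n : Int) (suf : List Int) :
    ∀ (pre : List Int) (rem : Int),
      ((pre.length : Int) + suf.length = n) →
      rem ≤ 2 * suf.length →
      evenLoop n (pre ++ suf) rem (pre.length : Int) = pre ++ bump suf rem := by
  induction suf with
  | nil =>
    intro pre rem _ hr
    simp at hr
    rw [evenLoop_nonpos _ _ _ _ (by omega), bump_nonpos _ _ (by omega)]
  | cons x xs ih =>
    intro pre rem hn hr
    by_cases hpos : rem > 0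
    · unfold evenLoop
      rw [if_pos hpos, PySem.List.pyGet?_append_length]
      simp only
      rw [PySem.List.pySetD_natCast]
      rw [set_append_cons]
      by_cases hr2 : rem - 2 > 0
      · -- the loop continues: xs ≠ [], index pre.length + 1 stays below n_axes
        have hxs : 0 < xs.length := by
          rcases xs with _ | ⟨y, ys⟩
          · simp at hr; omega
          · simp
        have hlt : (pre.length : Int) + 1 < n := by
          simp at hn; push_cast at hn; omega
        have hmod : PySem.Int.mod ((pre.length : Int) + 1) n = (pre.length : Int) + 1 := by
          rw [PySem.Int.mod_eq_emod_of_pos (by omega)]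
          exact Int.emod_eq_of_lt (by omega) hlt
        rw [hmod]
        have h1 : ((pre.length : Int) + 1) = (((pre ++ [x + 2]).length : Int)) := by
          simp
        have h2 : pre ++ (x + 2) :: xs = (pre ++ [x + 2]) ++ xs := by simp
        rw [h1, h2, ih (pre ++ [x + 2]) (rem - 2) (by simp at hn ⊢; push_cast at hn ⊢; omega) (by simp at hr ⊢; omega)]
        simp [bump, hpos]
      · -- the loop stops at the next check, whatever the new index is
        rw [evenLoop_nonpos _ _ _ _ (by omega)]
        simp [bump, hpos, bump_nonpos _ _ (by omega : rem - 2 ≤ 0)]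
    · rw [evenLoop_nonpos _ _ _ _ (by omega), bump_nonpos _ _ (by omega)]

theorem bump_replicate (m : Nat) :
    ∀ (base r : Int),
      bump (List.replicate m base) r
        = (List.range m).map (fun (j : Nat) => if 2 * (j : Int) < r then base + 2 else base) := by
  induction m with
  | zero => intro base r; rfl
  | succ m ih =>
    intro base r
    rw [List.replicate_succ, List.range_succ_eq_map]
    by_cases hr : r > 0
    · simp only [bump, if_pos hr, List.map_cons, List.map_map]
      have h0 : (if 2 * ((0 : Nat) : Int) < r then base + 2 else base) = base + 2 := by
        rw [if_pos]; omega
      rw [h0, ih base (r - 2)]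
      congr 1
      apply List.map_congr_left
      intro j _
      simp only [Function.comp_apply]
      by_cases hj : 2 * (j : Int) < r - 2
      · rw [if_pos hj, if_pos (by push_cast; omega)]
      · rw [if_neg hj, if_neg (by push_cast; omega)]
    · rw [bump_nonpos _ _ (by omega)]
      have : ∀ j ∈ (0 :: (List.range m).map Nat.succ),
          (if 2 * (j : Int) < r then base + 2 else base) = base := by
        intro j _; rw [if_neg]; omega
      rw [List.map_congr_left this]
      simp [Function.comp_def, List.map_const']

-- ===== VERDICT (by name: the statement is the Claim_ definition above) =====
theorem even_splits_py_spec : Claim_equal_even_splits_py := by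
  intro d n hdom hpre
  unfold Spec_even_splits_py even_splits_py even_splits_py_alt
  simp only
  set base := PySem.Int.floordiv d (2 * n) * 2 with hbase
  rcases hpre with hn | ⟨hn, hd⟩
  · -- n > 0
    have hsum : (List.replicate n.toNat base).sum = (n.toNat : Int) * base := by
      simp [List.sum_replicate]
    have hcast : ((n.toNat : Int)) = n := by omega
    set rem := d - (List.replicate n.toNat base).sum with hrem
    have hq : PySem.Int.floordiv d (2 * n) = d / (2 * n) :=
      PySem.Int.floordiv_eq_ediv_of_pos (by omega)
    have hdm := Int.ediv_add_emod d (2 * n)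
    have hmodnn := Int.emod_nonneg d (b := 2 * n) (by omega)
    have hmodlt := Int.emod_lt_of_pos d (b := 2 * n) (by omega)
    have hremv : rem = d % (2 * n) := by
      rw [hrem, hsum, hcast, hbase, hq]; linarith [hdm]
    have hb1 : rem ≤ 2 * (List.replicate n.toNat base).length := by
      simp; omega
    have h0 : evenLoop n ([] ++ List.replicate n.toNat base) rem (([] : List Int).length : Int)
        = [] ++ bump (List.replicate n.toNat base) rem :=
      evenLoop_append n (List.replicate n.toNat base) [] rem (by simp; omega) hb1
    simp at h0
    rw [h0, bump_replicate]
    rw [PySem.List.pyRange_one, List.map_map]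
    simp only [Int.sub_zero]
    apply List.map_congr_left
    intro j hj
    simp only [Function.comp]
    have hk : PySem.Int.floordiv (d - base * n + 1) 2 = (d - base * n + 1) / 2 :=
      PySem.Int.floordiv_eq_ediv_of_pos (by omega)
    have hrel : d - base * n = rem := by
      rw [hremv, hbase, hq]; linarith [hdm]
    rw [hk, hrel]
    have : (0 + (j : Int) < (rem + 1) / 2) ↔ (2 * (j : Int) < rem) := by omega
    by_cases hc : 2 * (j : Int) < rem
    · rw [if_pos hc, if_pos (this.mpr hc)]
    · rw [if_neg hc, if_neg (fun hx => hc (this.mp hx))]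
  · -- n < 0 and d ≤ 0: both sides are []
    have hz : n.toNat = 0 := by omega
    rw [hz]
    simp only [List.replicate, List.sum_nil]
    rw [evenLoop_nonpos _ _ _ _ (by omega)]
    rw [PySem.List.pyRange_one_eq_nil (by omega)]
    simp
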